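-- pv_equiv track=rewrite | github.com/Guilhem-Bonnet/Anime-Sama-Downloader | utils/tui.py | _availability_summary
-- ===== SOURCE A (Python) =====
-- def _availability_summary(episodes: dict[str, list[str]]) -> str:
--     if not episodes:
--         return "Disponibilité: —"
--
--     max_len = max((len(v) for v in episodes.values() if v), default=0)
--     if max_len <= 0:
--         return "Disponibilité: 0 épisode"
--
--     available: list[int] = []
--     missing: list[int] = []
--     for i in range(max_len):
--         ok = any((i < len(urls) and urls[i] and urls[i].strip()) for urls in episodes.values())
--         if ok:
--             available.append(i + 1)
--         else:
--             missing.append(i + 1)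
--
--     if not available:
--         return f"Disponibilité: 0/{max_len}"
--
--     avail_str = f"{available[0]}-{available[-1]} ({len(available)}/{max_len})"
--     if missing:
--         shown = ",".join(map(str, missing[:12]))
--         more = "…" if len(missing) > 12 else ""
--         return f"Disponibilité: {avail_str} | manquants: {shown}{more}"
--     return f"Disponibilité: {avail_str}"
-- ===== SOURCE B (Python) =====
-- def _availability_summary(episodes: dict[str, list[str]]) -> str:
--     if not episodes:
--         return "Disponibilité: —"
--
--     marked: set[int] = set()
--     max_len = 0
--     for urls in episodes.values():
--         if len(urls) > max_len:
--             max_len = len(urls)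
--         for i, u in enumerate(urls):
--             if u and u.strip():
--                 marked.add(i + 1)
--
--     if max_len == 0:
--         return "Disponibilité: 0 épisode"
--     if not marked:
--         return f"Disponibilité: 0/{max_len}"
--
--     missing = [i for i in range(1, max_len + 1) if i not in marked]
--     head = f"Disponibilité: {min(marked)}-{max(marked)} ({len(marked)}/{max_len})"
--     if not missing:
--         return head
--     tail = ",".join(map(str, missing[:12])) + ("…" if len(missing) > 12 else "")
--     return head + " | manquants: " + tail
-- ===== Notes on version B (the rewrite author's own statement) =====
-- stated objective: alternative
-- what changed: Replaces A's per-index any() scan over all sources and its available/missing accumulator loop by a single transposed pass that collects the set of 1-based available episode numbers (and the running max length) source by source, then derives the summary from that set with min/max/len and a membership filter over range(1, max_len+1).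
import Mathlib
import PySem

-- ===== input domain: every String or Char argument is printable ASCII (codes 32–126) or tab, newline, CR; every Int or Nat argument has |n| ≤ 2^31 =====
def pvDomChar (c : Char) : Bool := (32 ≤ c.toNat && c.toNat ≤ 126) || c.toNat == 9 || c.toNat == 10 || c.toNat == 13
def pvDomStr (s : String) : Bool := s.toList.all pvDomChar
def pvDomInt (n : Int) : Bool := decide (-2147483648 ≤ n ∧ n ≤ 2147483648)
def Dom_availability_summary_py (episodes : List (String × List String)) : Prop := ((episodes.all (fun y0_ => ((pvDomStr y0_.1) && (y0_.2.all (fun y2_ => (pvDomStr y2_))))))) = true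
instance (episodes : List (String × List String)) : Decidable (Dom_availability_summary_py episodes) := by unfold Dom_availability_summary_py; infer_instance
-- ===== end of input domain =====

-- B replaces A's per-index any() scan over all sources by a single transposed pass that accumulates
-- the SET of 1-based available episode numbers (and max_len) source by source, then reads the summary
-- off that set with min/max/len and a membership filter (objective: alternative).

-- truthiness of Python's `u and u.strip()` (shared primitive of both ports)
def pvTruthyUrl (u : String) : Bool := !u.toList.isEmpty && !(PySem.Str.strip u).toList.isEmpty

-- ===== PORT A =====
-- ok = any(i < len(urls) and urls[i] and urls[i].strip() for urls in episodes.values())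
def pvOkA (vals : List (List String)) (i : Nat) : Bool :=
  vals.any (fun urls => decide (i < urls.length) &&
    (match PySem.List.pyGet? urls (i : Int) with
     | some u => pvTruthyUrl u
     | none => false))

def availability_summary_py (episodes : List (String × List String)) : String :=
  if episodes.isEmpty then "Disponibilité: —"
  else
    let vals := (PySem.Dict.ofList episodes).values
    let max_len : Nat := ((vals.filter (fun v => !v.isEmpty)).map List.length).foldl max 0
    if max_len ≤ 0 then "Disponibilité: 0 épisode"
    else
      let pr := (List.range max_len).foldl
        (fun (pr : List Int × List Int) i =>
          if pvOkA vals i then (pr.1 ++ [(i : Int) + 1], pr.2)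
          else (pr.1, pr.2 ++ [(i : Int) + 1]))
        ([], [])
      let available := pr.1
      let missing := pr.2
      if available.isEmpty then "Disponibilité: 0/" ++ PySem.Int.toStr (max_len : Int)
      else
        let avail_str := PySem.Int.toStr (available.headD 0) ++ "-" ++ PySem.Int.toStr (available.getLastD 0) ++
          " (" ++ PySem.Int.toStr (available.length : Int) ++ "/" ++ PySem.Int.toStr (max_len : Int) ++ ")"
        if !missing.isEmpty then
          "Disponibilité: " ++ avail_str ++ " | manquants: " ++
            PySem.Str.join "," ((missing.take 12).map PySem.Int.toStr) ++
            (if missing.length > 12 then "…" else "")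
        else "Disponibilité: " ++ avail_str

-- ===== PORT B =====
-- one combined pass per source: track the running max length and add 1-based marked indices to a set
def pvScanSrc (st : PySem.Set Int × Nat) (urls : List String) : PySem.Set Int × Nat :=
  let mx := if urls.length > st.2 then urls.length else st.2
  (urls.zipIdx.foldl
      (fun mk pu => if pvTruthyUrl pu.1 then PySem.Set.add mk ((pu.2 : Int) + 1) else mk) st.1,
   mx)

def availability_summary_py_alt (episodes : List (String × List String)) : String :=
  if episodes.isEmpty then "Disponibilité: —"
  else
    let st := (PySem.Dict.ofList episodes).values.foldl pvScanSrc (PySem.Set.empty, 0)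
    let marked := st.1
    let max_len := st.2
    if max_len = 0 then "Disponibilité: 0 épisode"
    else if marked.isEmpty then "Disponibilité: 0/" ++ PySem.Int.toStr (max_len : Int)
    else
      let missing := (PySem.List.pyRange 1 ((max_len : Int) + 1) 1).filter
        (fun i => !PySem.Set.contains marked i)
      -- min(marked)/max(marked): marked is nonempty in this branch, so min?/max? are `some`
      let head := "Disponibilité: " ++ PySem.Int.toStr ((PySem.List.min? marked (fun x => x)).getD 0) ++ "-" ++
        PySem.Int.toStr ((PySem.List.max? marked (fun x => x)).getD 0) ++ " (" ++
        PySem.Int.toStr (PySem.Set.len marked) ++ "/" ++ PySem.Int.toStr (max_len : Int) ++ ")"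
      if missing.isEmpty then head
      else head ++ " | manquants: " ++
        PySem.Str.join "," ((missing.take 12).map PySem.Int.toStr) ++
        (if missing.length > 12 then "…" else "")

-- ===== PRECONDITION & SPEC =====
def Spec_availability_summary_py (episodes : List (String × List String)) (out : String) : Prop := out = availability_summary_py_alt episodes
instance (episodes : List (String × List String)) (out : String) : Decidable (Spec_availability_summary_py episodes out) := by unfold Spec_availability_summary_py; infer_instance

-- ===== CLAIM =====
def Claim_equal_availability_summary_py : Prop := ∀ (episodes : List (String × List String)), Dom_availability_summary_py episodes → Spec_availability_summary_py episodes (availability_summary_py episodes)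

-- ===== LEMMAS AND PROOFS =====

-- the per-index truthiness A tests, with the Nat-index lookup already in place
def pvHit (urls : List String) (i : Nat) : Bool :=
  decide (i < urls.length) &&
    (match urls[i]? with
     | some u => pvTruthyUrl u
     | none => false)

lemma pvOkA_eq_any_hit (vals : List (List String)) (i : Nat) :
    pvOkA vals i = vals.any (fun urls => pvHit urls i) := by
  simp [pvOkA, pvHit, PySem.List.pyGet?_natCast]

-- A's filtered max equals the plain running max
lemma max_len_eq (vals : List (List String)) : ∀ a : Nat,
    ((vals.filter (fun v => !v.isEmpty)).map List.length).foldl max a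
      = vals.foldl (fun m v => if m < v.length then v.length else m) a := by
  induction vals with
  | nil => intro a; rfl
  | cons v vs ih =>
    intro a
    by_cases h : v.isEmpty
    · have hl : v.length = 0 := by simpa [List.isEmpty_iff_length_eq_zero] using h
      simp [h, List.foldl_cons, hl, ih]
    · have hm : max a v.length = if a < v.length then v.length else a := by
        rw [Nat.max_def]; split <;> split <;> omega
      simp [h, List.foldl_cons, hm, ih]

-- B's combined fold, second component: the running max, independent of the set
lemma scan_snd (vals : List (List String)) : ∀ (s : PySem.Set Int) (m : Nat),
    (vals.foldl pvScanSrc (s, m)).2 = vals.foldl (fun m v => if m < v.length then v.length else m) m := by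
  induction vals with
  | nil => intro s m; rfl
  | cons v vs ih => intro s m; simp [List.foldl_cons, pvScanSrc, ih]

-- the running max bounds every member's length
lemma running_max_mono (vals : List (List String)) : ∀ m : Nat,
    m ≤ vals.foldl (fun m v => if m < v.length then v.length else m) m := by
  induction vals with
  | nil => intro m; exact le_refl m
  | cons v vs ih =>
    intro m
    have h := ih (if m < v.length then v.length else m)
    have hle : m ≤ (if m < v.length then v.length else m) := by split <;> omega
    simp only [List.foldl_cons]
    exact le_trans hle h

lemma le_running_max (vals : List (List String)) : ∀ (m : Nat) (v : List String), v ∈ vals →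
    v.length ≤ vals.foldl (fun m v => if m < v.length then v.length else m) m := by
  induction vals with
  | nil => intro m v hv; simp at hv
  | cons w vs ih =>
    intro m v hv
    simp only [List.foldl_cons]
    rcases List.mem_cons.mp hv with h | h
    · subst h
      have h2 := running_max_mono vs (if m < v.length then v.length else m)
      have hle : v.length ≤ (if m < v.length then v.length else m) := by split <;> omega
      exact le_trans hle h2
    · exact ih _ v h

-- inner fold of B: membership
lemma pvHit_cons_zero (u : String) (us : List String) : pvHit (u :: us) 0 = pvTruthyUrl u := by
  simp [pvHit]

lemma pvHit_cons_succ (u : String) (us : List String) (j : Nat) : pvHit (u :: us) (j + 1) = pvHit us j := by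
  simp [pvHit]

lemma inner_mem (urls : List String) : ∀ (k : Nat) (mk : PySem.Set Int) (x : Int),
    (x ∈ (urls.zipIdx k).foldl
        (fun mk pu => if pvTruthyUrl pu.1 then PySem.Set.add mk ((pu.2 : Int) + 1) else mk) mk)
      ↔ x ∈ mk ∨ ∃ i : Nat, pvHit urls i ∧ x = ((k + i : Nat) : Int) + 1 := by
  induction urls with
  | nil => intro k mk x; simp [List.zipIdx, pvHit]
  | cons u us ih =>
    intro k mk x
    simp only [List.zipIdx_cons, List.foldl_cons]
    rw [ih (k + 1)]
    constructor
    · rintro (hmk | ⟨i, hi, hx⟩)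
      · by_cases hp : pvTruthyUrl u
        · simp only [hp, if_true] at hmk
          rcases (PySem.Set.mem_add mk _ x).mp hmk with h | h
          · exact Or.inl h
          · exact Or.inr ⟨0, by rw [pvHit_cons_zero]; exact hp, by omega⟩
        · simp only [Bool.not_eq_true] at hp
          simp only [hp, Bool.false_eq_true, if_false] at hmk
          exact Or.inl hmk
      · refine Or.inr ⟨i + 1, by rw [pvHit_cons_succ]; exact hi, ?_⟩
        rw [hx]; push_cast; ring
    · rintro (hmk | ⟨i, hi, hx⟩)
      · left
        by_cases hp : pvTruthyUrl u
        · simp only [hp, if_true]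
          exact (PySem.Set.mem_add mk _ x).mpr (Or.inl hmk)
        · simp only [Bool.not_eq_true] at hp
          simpa [hp] using hmk
      · cases i with
        | zero =>
          left
          rw [pvHit_cons_zero] at hi
          simp only [hi, if_true]
          exact (PySem.Set.mem_add mk _ x).mpr (Or.inr (by rw [hx]; push_cast; ring))
        | succ j =>
          refine Or.inr ⟨j, by rw [pvHit_cons_succ] at hi; exact hi, ?_⟩
          rw [hx]; push_cast; ring

lemma inner_nodup (l : List (String × Nat)) : ∀ (mk : PySem.Set Int), mk.Nodup →
    (l.foldl (fun mk pu => if pvTruthyUrl pu.1 then PySem.Set.add mk ((pu.2 : Int) + 1) else mk) mk).Nodup := by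
  induction l with
  | nil => intro mk h; exact h
  | cons pu l ih =>
    intro mk h
    by_cases hp : pvTruthyUrl pu.1
    · simp only [List.foldl_cons, hp, if_true]; exact ih _ (PySem.Set.nodup_add _ _ h)
    · simp only [List.foldl_cons, hp]; exact ih _ h

-- B's combined fold, first component: membership and nodup
lemma scan_mem (vals : List (List String)) : ∀ (s : PySem.Set Int) (m : Nat) (x : Int),
    (x ∈ (vals.foldl pvScanSrc (s, m)).1)
      ↔ x ∈ s ∨ ∃ urls ∈ vals, ∃ i : Nat, pvHit urls i ∧ x = (i : Int) + 1 := by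
  induction vals with
  | nil => intro s m x; simp
  | cons v vs ih =>
    intro s m x
    simp only [List.foldl_cons, pvScanSrc]
    rw [ih]
    have hinner := inner_mem v 0 s x
    simp only [Nat.zero_add] at hinner
    rw [hinner]
    constructor
    · rintro ((hs | ⟨i, hi, hx⟩) | ⟨urls, hu, i, hi, hx⟩)
      · exact Or.inl hs
      · exact Or.inr ⟨v, List.mem_cons_self, i, hi, hx⟩
      · exact Or.inr ⟨urls, List.mem_cons_of_mem v hu, i, hi, hx⟩
    · rintro (hs | ⟨urls, hu, i, hi, hx⟩)
      · exact Or.inl (Or.inl hs)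
      · rcases List.mem_cons.mp hu with h | h
        · subst h; exact Or.inl (Or.inr ⟨i, hi, hx⟩)
        · exact Or.inr ⟨urls, h, i, hi, hx⟩

lemma scan_nodup (vals : List (List String)) : ∀ (s : PySem.Set Int) (m : Nat), s.Nodup →
    ((vals.foldl pvScanSrc (s, m)).1).Nodup := by
  induction vals with
  | nil => intro s m h; exact h
  | cons v vs ih =>
    intro s m h
    simp only [List.foldl_cons, pvScanSrc]
    exact ih _ _ (inner_nodup _ _ h)

-- A's accumulator fold is the two filters
lemma pair_fold (p : Nat → Bool) (n : Nat) : ∀ (a b : List Int),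
    (List.range n).foldl
        (fun (pr : List Int × List Int) i =>
          if p i then (pr.1 ++ [(i : Int) + 1], pr.2) else (pr.1, pr.2 ++ [(i : Int) + 1]))
        (a, b)
      = (a ++ ((List.range n).filter p).map (fun i : Nat => (i : Int) + 1),
         b ++ ((List.range n).filter (fun i => !p i)).map (fun i : Nat => (i : Int) + 1)) := by
  induction n with
  | zero => intro a b; simp
  | succ n ih =>
    intro a b
    rw [List.range_succ, List.foldl_append, ih a b]
    by_cases h : p n <;> simp [h, List.filter_append]

-- head of a strictly increasing list is its minimum
lemma head_is_min (x : Int) (t : List Int) (h : (x :: t).Pairwise (· < ·)) :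
    ∀ y ∈ x :: t, x ≤ y := by
  intro y hy
  rcases List.mem_cons.mp hy with h1 | h1
  · omega
  · exact le_of_lt ((List.pairwise_cons.mp h).1 y h1)

-- last of a strictly increasing list is its maximum
lemma last_is_max : ∀ (x : Int) (t : List Int), (x :: t).Pairwise (· < ·) →
    ∀ y ∈ x :: t, y ≤ (x :: t).getLastD 0 := by
  intro x t
  induction t generalizing x with
  | nil => intro _ y hy; simp at hy; simp [hy]
  | cons z t' ih =>
    intro h y hy
    have htail := (List.pairwise_cons.mp h).2
    have hxz : x < z := (List.pairwise_cons.mp h).1 z List.mem_cons_self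
    have hlast : (x :: z :: t').getLastD 0 = (z :: t').getLastD 0 := by
      simp [List.getLastD]
    rw [hlast]
    rcases List.mem_cons.mp hy with h1 | h1
    · subst h1
      have := ih z htail z List.mem_cons_self
      omega
    · exact ih z htail y h1

-- ===== VERDICT =====
theorem availability_summary_py_spec : Claim_equal_availability_summary_py := by
  intro episodes _
  unfold Spec_availability_summary_py availability_summary_py availability_summary_py_alt
  by_cases h : episodes.isEmpty
  · simp [h]
  · simp only [h, Bool.false_eq_true, if_false]
    set vals := (PySem.Dict.ofList episodes).values with hvals
    rw [max_len_eq vals 0, scan_snd vals PySem.Set.empty 0]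
    set n := vals.foldl (fun m v => if m < v.length then v.length else m) 0 with hn
    by_cases hz : n = 0
    · simp [hz]
    · have hle : ¬ n ≤ 0 := by omega
      simp only [hle, hz, if_false]
      rw [pair_fold (pvOkA vals) n [] []]
      simp only [List.nil_append]
      set marked := (vals.foldl pvScanSrc (PySem.Set.empty, 0)).1 with hmarked
      set avail := ((List.range n).filter (pvOkA vals)).map (fun i : Nat => (i : Int) + 1) with havail
      have hmem : ∀ x, x ∈ marked ↔ x ∈ avail := by
        intro x
        rw [hmarked, scan_mem, havail]
        simp only [PySem.Set.empty, List.not_mem_nil, false_or, List.mem_map, List.mem_filter,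
          List.mem_range]
        constructor
        · rintro ⟨urls, hu, i, hi, hx⟩
          refine ⟨i, ⟨?_, ?_⟩, hx.symm⟩
          · have hlt : i < urls.length := by
              have := (Bool.and_eq_true _ _).mp hi
              exact of_decide_eq_true this.1
            have := le_running_max vals 0 urls hu
            omega
          · rw [pvOkA_eq_any_hit]
            exact List.any_eq_true.mpr ⟨urls, hu, hi⟩
        · rintro ⟨i, ⟨_, hp⟩, hx⟩
          rw [pvOkA_eq_any_hit] at hp
          rcases List.any_eq_true.mp hp with ⟨urls, hu, hi⟩
          exact ⟨urls, hu, i, hi, hx.symm⟩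
      have hnodupM : marked.Nodup := scan_nodup vals _ 0 List.nodup_nil
      have hpw : avail.Pairwise (· < ·) := by
        rw [havail]
        refine List.Pairwise.map _ (fun a b hab => by omega)
          (List.Pairwise.filter _ List.pairwise_lt_range)
      have hnodupA : avail.Nodup := hpw.imp (fun hab => ne_of_lt hab)
      have hperm : marked.Perm avail := (List.perm_ext_iff_of_nodup hnodupM hnodupA).mpr hmem
      have hmiss : (PySem.List.pyRange 1 ((n : Int) + 1) 1).filter (fun i => !PySem.Set.contains marked i)
          = ((List.range n).filter (fun i => !pvOkA vals i)).map (fun i : Nat => (i : Int) + 1) := by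
        rw [PySem.List.pyRange_one]
        have h1 : ((n : Int) + 1 - 1).toNat = n := by omega
        rw [h1, List.filter_map]
        have hf : (List.range n).filter ((fun i => !PySem.Set.contains marked i) ∘ (fun k : Nat => (1 : Int) + k))
            = (List.range n).filter (fun i => !pvOkA vals i) := by
          apply List.filter_congr
          intro k hk
          have hk' : k < n := List.mem_range.mp hk
          simp only [Function.comp]
          congr 1
          by_cases hpk : pvOkA vals k
          · rw [hpk]
            rw [(PySem.Set.contains_iff marked _).mpr]
            rw [hmem, havail]
            simp only [List.mem_map, List.mem_filter, List.mem_range]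
            exact ⟨k, ⟨hk', hpk⟩, by ring⟩
          · simp only [Bool.not_eq_true] at hpk
            rw [hpk]
            rw [← Bool.not_eq_true]
            intro hc
            have hm := (PySem.Set.contains_iff marked _).mp hc
            rw [hmem, havail] at hm
            simp only [List.mem_map, List.mem_filter, List.mem_range] at hm
            rcases hm with ⟨j, ⟨_, hpj⟩, hj⟩
            have : j = k := by omega
            rw [this] at hpj
            rw [hpk] at hpj
            simp at hpj
        rw [hf]
        exact List.map_congr_left (fun a _ => by ring)
      rw [hmiss]
      rcases hA : avail with _ | ⟨a, t⟩
      · have hM : marked = [] := by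
          rw [hA] at hperm; exact hperm.eq_nil
        rw [hA] at hperm
        simp [hM]
      · have hMne : marked ≠ [] := by
          intro hc; rw [hc, hA] at hperm; exact absurd hperm.symm.eq_nil (by simp)
        have hMe : marked.isEmpty = false := by
          rw [List.isEmpty_eq_false_iff]; exact hMne
        rw [hA] at hperm hmem hpw
        simp only [hMe, List.isEmpty_cons, Bool.false_eq_true, if_false]
        -- min(marked) = head, max(marked) = last, len(marked) = length
        obtain ⟨mn, hmn⟩ : ∃ mn, PySem.List.min? marked (fun x => x) = some mn := by
          rcases he : PySem.List.min? marked (fun x => x) with _ | mn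
          · exact absurd ((PySem.List.min?_eq_none_iff _ _).mp he) hMne
          · exact ⟨mn, rfl⟩
        obtain ⟨mx, hmx⟩ : ∃ mx, PySem.List.max? marked (fun x => x) = some mx := by
          rcases he : PySem.List.max? marked (fun x => x) with _ | mx
          · exact absurd ((PySem.List.max?_eq_none_iff _ _).mp he) hMne
          · exact ⟨mx, rfl⟩
        have hmn_eq : mn = a := by
          have h1 : mn ∈ a :: t := (hmem mn).mp (PySem.List.min?_mem hmn)
          have h2 : a ≤ mn := head_is_min a t hpw mn h1
          have h3 : mn ≤ a := PySem.List.min?_isMin hmn a ((hmem a).mpr List.mem_cons_self)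
          omega
        have hmx_eq : mx = (a :: t).getLastD 0 := by
          have h1 : mx ∈ a :: t := (hmem mx).mp (PySem.List.max?_mem hmx)
          have h2 : mx ≤ (a :: t).getLastD 0 := last_is_max a t hpw mx h1
          have hlm : (a :: t).getLastD 0 ∈ a :: t := by
            rw [List.getLastD_cons]; exact List.getLastD_mem_cons
          have h3 : (a :: t).getLastD 0 ≤ mx := PySem.List.max?_isMax hmx _ ((hmem _).mpr hlm)
          omega
        have hlen : PySem.Set.len marked = ((a :: t).length : Int) := by
          simp only [PySem.Set.len]
          rw [hperm.length_eq]
        rw [hmn, hmx, hmn_eq, hmx_eq, hlen]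
        simp only [Option.getD_some, List.headD_cons]
        by_cases hms : (((List.range n).filter (fun i => !pvOkA vals i)).map (fun i : Nat => (i : Int) + 1)).isEmpty
        · simp only [hms, Bool.not_true, Bool.false_eq_true, if_false, if_true]
          simp only [String.append_assoc]
        · simp only [hms, Bool.not_false, Bool.false_eq_true, if_false, if_true]
          simp only [String.append_assoc]
          rfl
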